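-- pv_equiv track=rewrite | github.com/nhuannguyen1/pyRevitnvn | pyRevitnvn.tab/Training.panel/reau.pushbutton/script.py | get_edges_lines_corners_main
-- ===== SOURCE A (Python) =====
-- def plot_design_cordninates(list_values):
--     """
--     :param list_values: a list of grid spacings, i.e. [1,3,5], the spacing is 1, 3, 5
--     :return: A list of where the ith grid spacing is, i.e [1,4,9] (first line is at 1, second at 4, etc)
--     """
--     new_list_cor = []
--     sum_val = 0
--     for i in list_values:
--         sum_val += i
--         new_list_cor.append(sum_val)
--     return new_list_cor
--
-- def make_point_from_coords(x, y, z=None):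
--     if z is None:
--         return [x, y]
--     return [x, y, z]
--
-- def get_corr_lines(far_pos, grid_line_spacing):
--     """
--     Gets the corner_lines position
--     :param far_pos: The position that is the farthest, either front to back or left to right
--     :param grid_line_spacing: The list that contains the grid line spacing of the of the dimension not stated above
--             (i.e. far_pos is back to front and list is left to right)
--     :return: corrlines_x, corr_lines_y
--     """
--     corr_lines_x = []
--     corr_lines_y = []
--     corr_x = [0, 0]
--     corr_y = [0, far_pos]
--     corr_lines_x.append(corr_x)
--     corr_lines_y.append(corr_y)
--     for x in plot_design_cordninates(grid_line_spacing):
--         corr_x = [x, x]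
--         corr_y = [0, far_pos]
--         corr_lines_x.append(corr_x)
--         corr_lines_y.append(corr_y)
--
--     return corr_lines_x, corr_lines_y
--
-- def get_edges_lines_corners_single_iteration(corr_linesA_x, corr_linesA_y, do_3d=False):
--     """
--     Helper function do remove duplication
--     :param corr_linesA_x: corner lines along x dimension
--     :param corr_linesA_y: corner lines along y dimension
--     :param do_3d: boolean, should add 3d points (z=0) or not
--     :return: plot_edges, plot_lines, corner_points
--     """
--     if do_3d:
--         z = 0
--     else:
--         z = None
--     plot_edges = []
--     corner_points = []
--     plot_lines = []
--     i = 0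
--     for x, y in zip(corr_linesA_x, corr_linesA_y):
--         point_a = make_point_from_coords(x[0], y[0], z)
--         point_b = make_point_from_coords(x[1], y[1], z)
--
--         if i == 0 or i == len(corr_linesA_x) - 1:
--             # Corners
--             plot_edges.append([point_a, point_b])
--             corner_points.append(point_a)
--             corner_points.append(point_b)
--         else:
--             plot_lines.append([point_a, point_b])
--         i += 1
--     return plot_edges, plot_lines, corner_points
--
-- def get_edges_lines_corners_main(grid_spacing_front_to_back, grid_spacing_left_to_right, do_3d=False):
--     """
--     :param grid_spacing_front_to_back:
--     :param grid_spacing_left_to_right: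
--     :param do_3d: boolean, should add 3d points (z=0) or not
--     :return: plot_edges, plot_lines, corners
--     """
--     corr_linesX_x, corr_linesX_y = get_corr_lines(sum(grid_spacing_left_to_right), grid_spacing_front_to_back)
--
--     corr_linesY_y, corr_linesY_x = get_corr_lines(sum(grid_spacing_front_to_back), grid_spacing_left_to_right)
--
--     plot_edges, plot_lines, corner_points = get_edges_lines_corners_single_iteration(corr_linesX_x,
--                                                                                      corr_linesX_y, do_3d)
--
--     plot_edges_y, plot_lines_y, corner_points_y = get_edges_lines_corners_single_iteration(corr_linesY_x,
--                                                                                            corr_linesY_y, do_3d)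
--     # Concatenate two lists
--     plot_edges = plot_edges + plot_edges_y
--     plot_lines = plot_lines + plot_lines_y
--     corner_points = corner_points + corner_points_y
--     corners = []
--     for m in corner_points:
--         if m not in corners:
--             corners.append(m)
--     return plot_edges, plot_lines, corners
-- ===== SOURCE B (Python) =====
-- def get_edges_lines_corners_main(grid_spacing_front_to_back, grid_spacing_left_to_right, do_3d=False):
--     sx = sum(grid_spacing_front_to_back)
--     sy = sum(grid_spacing_left_to_right)
--     z = [0] if do_3d else []
--
--     def vline(x):
--         return [[x, 0] + z, [x, sy] + z]
--
--     def hline(y):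
--         return [[0, y] + z, [sx, y] + z]
--
--     def interiors(spacing, line):
--         out, s = [], 0
--         for d in spacing[:-1]:
--             s += d
--             out.append(line(s))
--         return out
--
--     edges = ([vline(0)] if not grid_spacing_front_to_back else [vline(0), vline(sx)]) \
--           + ([hline(0)] if not grid_spacing_left_to_right else [hline(0), hline(sy)])
--     lines = interiors(grid_spacing_front_to_back, vline) \
--           + interiors(grid_spacing_left_to_right, hline)
--     corners = []
--     for p in ([0, 0] + z, [0, sy] + z, [sx, 0] + z, [sx, sy] + z):
--         if p not in corners:
--             corners.append(p)
--     return edges, lines, corners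
-- ===== Notes on version B (the rewrite author's own statement) =====
-- stated objective: simpler
-- what changed: B never builds the per-line coordinate-pair lists or classifies lines with an index-counting zip loop: edges come from a closed form using only the two totals sum(front_to_back) and sum(left_to_right), corners are the deduplicated four rectangle corner candidates computed directly (no collection and dedup of edge endpoints), and only the interior lines use a running-sum loop over spacing[:-1].
import Mathlib
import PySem

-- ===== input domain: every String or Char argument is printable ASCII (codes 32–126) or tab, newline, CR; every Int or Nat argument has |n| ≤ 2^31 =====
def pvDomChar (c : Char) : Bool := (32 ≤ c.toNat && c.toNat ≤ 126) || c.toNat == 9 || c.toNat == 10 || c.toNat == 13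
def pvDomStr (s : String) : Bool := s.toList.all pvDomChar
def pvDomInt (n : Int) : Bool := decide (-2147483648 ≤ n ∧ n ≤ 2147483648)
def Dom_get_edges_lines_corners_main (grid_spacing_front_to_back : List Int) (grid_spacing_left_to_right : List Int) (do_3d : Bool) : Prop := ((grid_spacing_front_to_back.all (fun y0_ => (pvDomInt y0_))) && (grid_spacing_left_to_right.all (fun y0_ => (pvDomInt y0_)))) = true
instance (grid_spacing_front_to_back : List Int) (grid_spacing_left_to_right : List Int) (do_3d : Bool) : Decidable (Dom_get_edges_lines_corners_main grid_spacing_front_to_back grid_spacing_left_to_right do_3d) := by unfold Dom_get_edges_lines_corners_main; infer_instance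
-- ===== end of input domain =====

-- B drops A's per-line index-classifying loops and endpoint collection: edges and corners come
-- from closed forms over the two spacing totals, only interior lines use a running-sum loop
-- over spacing[:-1] (objective: simpler).

-- ===== PORT A =====
def plot_design_cordninates (list_values : List Int) : List Int :=
  (list_values.foldl
    (fun (st : List Int × Int) i =>
      let s := st.2 + i
      (st.1 ++ [s], s))
    ([], 0)).1

def make_point_from_coords (x y : Int) (z : Option Int) : List Int :=
  match z with
  | none => [x, y]
  | some zv => [x, y, zv]

def get_corr_lines (far_pos : Int) (grid_line_spacing : List Int) :
    List (List Int) × List (List Int) :=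
  (plot_design_cordninates grid_line_spacing).foldl
    (fun (st : List (List Int) × List (List Int)) x =>
      (st.1 ++ [[x, x]], st.2 ++ [[0, far_pos]]))
    ([[0, 0]], [[0, far_pos]])

def get_edges_lines_corners_single_iteration (corr_linesA_x corr_linesA_y : List (List Int))
    (do_3d : Bool) :
    List (List (List Int)) × List (List (List Int)) × List (List Int) :=
  let z : Option Int := if do_3d then some 0 else none
  let st := (List.zip corr_linesA_x corr_linesA_y).foldl
    (fun (st : List (List (List Int)) × List (List (List Int)) × List (List Int) × Int) xy =>
      let point_a := make_point_from_coords (PySem.List.pyGetD xy.1 0 0) (PySem.List.pyGetD xy.2 0 0) z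
      let point_b := make_point_from_coords (PySem.List.pyGetD xy.1 1 0) (PySem.List.pyGetD xy.2 1 0) z
      let i := st.2.2.2
      if i = 0 ∨ i = (corr_linesA_x.length : Int) - 1 then
        (st.1 ++ [[point_a, point_b]], st.2.1, st.2.2.1 ++ [point_a, point_b], i + 1)
      else
        (st.1, st.2.1 ++ [[point_a, point_b]], st.2.2.1, i + 1))
    ([], [], [], 0)
  (st.1, st.2.1, st.2.2.1)

def get_edges_lines_corners_main (grid_spacing_front_to_back : List Int)
    (grid_spacing_left_to_right : List Int) (do_3d : Bool) :
    List (List (List Int)) × List (List (List Int)) × List (List Int) :=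
  let cX := get_corr_lines grid_spacing_left_to_right.sum grid_spacing_front_to_back
  let cY := get_corr_lines grid_spacing_front_to_back.sum grid_spacing_left_to_right
  let rX := get_edges_lines_corners_single_iteration cX.1 cX.2 do_3d
  let rY := get_edges_lines_corners_single_iteration cY.2 cY.1 do_3d
  let plot_edges := rX.1 ++ rY.1
  let plot_lines := rX.2.1 ++ rY.2.1
  let corner_points := rX.2.2 ++ rY.2.2
  let corners := corner_points.foldl
    (fun acc m => if m ∈ acc then acc else acc ++ [m]) []
  (plot_edges, plot_lines, corners)

-- ===== PORT B =====
-- interiors(spacing, line): running-sum loop over spacing[:-1]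
def pvInteriors (spacing : List Int) (line : Int → List (List Int)) : List (List (List Int)) :=
  ((PySem.List.slice spacing none (some (-1))).foldl
    (fun (st : List (List (List Int)) × Int) d =>
      (st.1 ++ [line (st.2 + d)], st.2 + d))
    ([], 0)).1

def get_edges_lines_corners_main_alt (grid_spacing_front_to_back : List Int)
    (grid_spacing_left_to_right : List Int) (do_3d : Bool) :
    List (List (List Int)) × List (List (List Int)) × List (List Int) :=
  let sx := grid_spacing_front_to_back.sum
  let sy := grid_spacing_left_to_right.sum
  let z : List Int := if do_3d then [0] else []
  let vline := fun (x : Int) => [[x, 0] ++ z, [x, sy] ++ z]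
  let hline := fun (y : Int) => [[0, y] ++ z, [sx, y] ++ z]
  let edges :=
    (if grid_spacing_front_to_back = [] then [vline 0] else [vline 0, vline sx]) ++
    (if grid_spacing_left_to_right = [] then [hline 0] else [hline 0, hline sy])
  let lines := pvInteriors grid_spacing_front_to_back vline ++
               pvInteriors grid_spacing_left_to_right hline
  let corners := ([[0, 0] ++ z, [0, sy] ++ z, [sx, 0] ++ z, [sx, sy] ++ z] : List (List Int)).foldl
    (fun acc p => if p ∈ acc then acc else acc ++ [p]) []
  (edges, lines, corners)

-- ===== PRECONDITION & SPEC =====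
def Spec_get_edges_lines_corners_main (grid_spacing_front_to_back : List Int) (grid_spacing_left_to_right : List Int) (do_3d : Bool) (out : List (List (List Int)) × List (List (List Int)) × List (List Int)) : Prop := out = get_edges_lines_corners_main_alt grid_spacing_front_to_back grid_spacing_left_to_right do_3d
instance (grid_spacing_front_to_back : List Int) (grid_spacing_left_to_right : List Int) (do_3d : Bool) (out : List (List (List Int)) × List (List (List Int)) × List (List Int)) : Decidable (Spec_get_edges_lines_corners_main grid_spacing_front_to_back grid_spacing_left_to_right do_3d out) := by unfold Spec_get_edges_lines_corners_main; infer_instance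

-- ===== CLAIM (what is proved, stated in full; the proofs are below) =====
def Claim_equal_get_edges_lines_corners_main : Prop := ∀ (grid_spacing_front_to_back : List Int) (grid_spacing_left_to_right : List Int) (do_3d : Bool), Dom_get_edges_lines_corners_main grid_spacing_front_to_back grid_spacing_left_to_right do_3d → Spec_get_edges_lines_corners_main grid_spacing_front_to_back grid_spacing_left_to_right do_3d (get_edges_lines_corners_main grid_spacing_front_to_back grid_spacing_left_to_right do_3d)

-- ===== LEMMAS AND PROOFS =====

-- running cumulative sums, as a structural recursion
def pvSums (s : Int) : List Int → List Int
  | [] => []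
  | a :: t => (s + a) :: pvSums (s + a) t

lemma pv_pdc_general (l : List Int) : ∀ (acc : List Int) (s : Int),
    (l.foldl (fun (st : List Int × Int) i =>
        let s' := st.2 + i
        (st.1 ++ [s'], s')) (acc, s)) = (acc ++ pvSums s l, s + l.sum) := by
  induction l with
  | nil => intro acc s; simp [pvSums]
  | cons a t ih =>
      intro acc s
      simp only [List.foldl_cons, ih, pvSums, List.sum_cons, Prod.mk.injEq]
      exact ⟨by simp, by ring⟩

lemma pv_pdc_eq (l : List Int) : plot_design_cordninates l = pvSums 0 l := by
  simp [plot_design_cordninates, pv_pdc_general]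

lemma pv_pair_fold (g h : Int → List Int) (l : List Int) : ∀ (A B : List (List Int)),
    (l.foldl (fun (st : List (List Int) × List (List Int)) x =>
        (st.1 ++ [g x], st.2 ++ [h x])) (A, B)) = (A ++ l.map g, B ++ l.map h) := by
  induction l with
  | nil => intro A B; simp
  | cons a t ih => intro A B; simp [ih]

lemma pv_corr_lines (far : Int) (sp : List Int) :
    get_corr_lines far sp =
      ((0 :: pvSums 0 sp).map (fun x => [x, x]),
       (0 :: pvSums 0 sp).map (fun _ => [0, far])) := by
  simp [get_corr_lines, pv_pdc_eq, pv_pair_fold]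

-- the indexed classification loop of A, over the position list
def pvStep (pa pb : Int → List Int) (n : Int)
    (st : List (List (List Int)) × List (List (List Int)) × List (List Int) × Int) (x : Int) :
    List (List (List Int)) × List (List (List Int)) × List (List Int) × Int :=
  if st.2.2.2 = 0 ∨ st.2.2.2 = n - 1 then
    (st.1 ++ [[pa x, pb x]], st.2.1, st.2.2.1 ++ [pa x, pb x], st.2.2.2 + 1)
  else
    (st.1, st.2.1 ++ [[pa x, pb x]], st.2.2.1, st.2.2.2 + 1)

-- what A's indexed loop produces: first/last as edges, interior as lines
def pvABC (pa pb : Int → List Int) : List Int →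
    List (List (List Int)) × List (List (List Int)) × List (List Int)
  | [] => ([], [], [])
  | [x] => ([[pa x, pb x]], [], [pa x, pb x])
  | x :: rest =>
      ([[pa x, pb x], [pa (rest.getLastD 0), pb (rest.getLastD 0)]],
       rest.dropLast.map (fun y => [pa y, pb y]),
       [pa x, pb x, pa (rest.getLastD 0), pb (rest.getLastD 0)])

lemma pvStep_tail (pa pb : Int → List Int) (n : Int) :
    ∀ (rest : List Int) (E L : List (List (List Int))) (C : List (List Int)) (i : Int),
      1 ≤ i → i + rest.length = n → rest ≠ [] →
      rest.foldl (pvStep pa pb n) (E, L, C, i) =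
        (E ++ [[pa (rest.getLastD 0), pb (rest.getLastD 0)]],
         L ++ rest.dropLast.map (fun y => [pa y, pb y]),
         C ++ [pa (rest.getLastD 0), pb (rest.getLastD 0)],
         i + rest.length) := by
  intro rest
  induction rest with
  | nil => intro _ _ _ _ _ _ hne; exact absurd rfl hne
  | cons a t ih =>
      intro E L C i h1 hn _
      cases t with
      | nil =>
          have hcond : (i = 0 ∨ i = n - 1) := by right; simp at hn; omega
          simp [pvStep, hcond]
      | cons b t' =>
          have hcond : ¬ (i = 0 ∨ i = n - 1) := by
            simp only [List.length_cons] at hn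
            omega
          have hrec := ih E (L ++ [[pa a, pb a]]) C (i + 1)
            (by omega) (by simp at hn ⊢; omega) (by simp)
          rw [List.foldl_cons,
            show pvStep pa pb n (E, L, C, i) a = (E, L ++ [[pa a, pb a]], C, i + 1) from by
              simp [pvStep, hcond],
            hrec]
          simp only [List.getLastD_cons, List.dropLast_cons₂, List.map_cons,
            List.length_cons, Prod.mk.injEq]
          simp only [List.append_assoc, List.singleton_append, true_and]
          omega

lemma pvStep_full (pa pb : Int → List Int) (xs : List Int) :
    (let st := xs.foldl (pvStep pa pb (xs.length : Int)) ([], [], [], 0)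
     (st.1, st.2.1, st.2.2.1)) = pvABC pa pb xs := by
  cases xs with
  | nil => simp [pvABC]
  | cons x rest =>
      cases rest with
      | nil => simp [pvStep, pvABC]
      | cons b t =>
          rw [List.foldl_cons,
            show pvStep pa pb ((x :: b :: t).length : Int) ([], [], [], 0) x
                = ([[pa x, pb x]], [], [pa x, pb x], 1) from by simp [pvStep],
            pvStep_tail pa pb ((x :: b :: t).length : Int) (b :: t)
              [[pa x, pb x]] [] [pa x, pb x] 1 (by omega)
              (by simp; ring) (by simp)]
          simp [pvABC]

lemma pv_mk_point (a b : Int) (d : Bool) :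
    make_point_from_coords a b (if d then some 0 else none) =
      [a, b] ++ (if d then [0] else []) := by
  cases d <;> rfl

lemma pv_single_iter (g1 g2 pa pb : Int → List Int) (xs : List Int) (d3 : Bool)
    (hpa : ∀ x, make_point_from_coords (PySem.List.pyGetD (g1 x) 0 0)
      (PySem.List.pyGetD (g2 x) 0 0) (if d3 then some 0 else none) = pa x)
    (hpb : ∀ x, make_point_from_coords (PySem.List.pyGetD (g1 x) 1 0)
      (PySem.List.pyGetD (g2 x) 1 0) (if d3 then some 0 else none) = pb x) :
    get_edges_lines_corners_single_iteration (xs.map g1) (xs.map g2) d3 = pvABC pa pb xs := by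
  rw [← pvStep_full pa pb xs]
  simp only [get_edges_lines_corners_single_iteration, List.zip_map', List.foldl_map,
    List.length_map]
  refine congrArg (fun st : List (List (List Int)) × List (List (List Int)) ×
      List (List Int) × Int => (st.1, st.2.1, st.2.2.1)) ?_
  apply List.foldl_ext
  intro st y _
  simp only [pvStep, hpa, hpb]

lemma pv_pyGetD_pair0 (a b : Int) : PySem.List.pyGetD [a, b] 0 0 = a := by
  simp [pysem]

lemma pv_pyGetD_pair1 (a b : Int) : PySem.List.pyGetD [a, b] 1 0 = b := by
  simp [pysem]

-- B side: the running-sum interior loop produces the mapped cumulative sums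
lemma pv_interiors_fold (line : Int → List (List Int)) (l : List Int) :
    ∀ (acc : List (List (List Int))) (s : Int),
      (l.foldl (fun (st : List (List (List Int)) × Int) d =>
          (st.1 ++ [line (st.2 + d)], st.2 + d)) (acc, s))
        = (acc ++ (pvSums s l).map line, s + l.sum) := by
  induction l with
  | nil => intro acc s; simp [pvSums]
  | cons a t ih =>
      intro acc s
      simp only [List.foldl_cons, ih, pvSums, List.map_cons, List.sum_cons, Prod.mk.injEq]
      exact ⟨by simp, by ring⟩

lemma pv_interiors_eq (sp : List Int) (line : Int → List (List Int)) :
    pvInteriors sp line = (pvSums 0 sp.dropLast).map line := by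
  simp [pvInteriors, PySem.List.slice_to_neg_one, pv_interiors_fold]

lemma pv_sums_ne_nil (s : Int) (l : List Int) (h : l ≠ []) : pvSums s l ≠ [] := by
  cases l with
  | nil => exact absurd rfl h
  | cons a t => simp [pvSums]

lemma pv_sums_getLastD : ∀ (l : List Int), l ≠ [] → ∀ (s d : Int),
    (pvSums s l).getLastD d = s + l.sum
  | [], h => absurd rfl h
  | [a], _ => by intro s d; simp [pvSums]
  | a :: b :: t', _ => by
      intro s d
      rw [show pvSums s (a :: b :: t') = (s + a) :: pvSums (s + a) (b :: t') from rfl,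
        List.getLastD_cons, pv_sums_getLastD (b :: t') (by simp) (s + a) (s + a)]
      simp only [List.sum_cons]
      ring

lemma pv_sums_dropLast : ∀ (l : List Int) (s : Int),
    pvSums s l.dropLast = (pvSums s l).dropLast := by
  intro l
  induction l with
  | nil => intro s; rfl
  | cons a t ih =>
      intro s
      cases t with
      | nil => rfl
      | cons b t' =>
          rw [List.dropLast_cons₂,
            show pvSums s (a :: (b :: t').dropLast) = (s + a) :: pvSums (s + a) (b :: t').dropLast
              from rfl,
            ih (s + a),
            show pvSums s (a :: b :: t') = (s + a) :: pvSums (s + a) (b :: t') from rfl,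
            List.dropLast_cons_of_ne_nil (pv_sums_ne_nil (s + a) (b :: t') (by simp))]

-- dedup-fold helpers
lemma pv_dedup_mem : ∀ (u : List (List Int)) (acc : List (List Int)) (x : List Int),
    (x ∈ acc ∨ x ∈ u) →
    x ∈ u.foldl (fun acc m => if m ∈ acc then acc else acc ++ [m]) acc := by
  intro u
  induction u with
  | nil => intro acc x h; simpa using h
  | cons a t ih =>
      intro acc x h
      simp only [List.foldl_cons]
      by_cases ha : a ∈ acc
      · rw [if_pos ha]
        apply ih
        rcases h with h | h
        · exact Or.inl h
        · rcases List.mem_cons.mp h with rfl | h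
          · exact Or.inl ha
          · exact Or.inr h
      · rw [if_neg ha]
        apply ih
        rcases h with h | h
        · exact Or.inl (by simp [h])
        · rcases List.mem_cons.mp h with rfl | h
          · exact Or.inl (by simp)
          · exact Or.inr h

lemma pv_dedup_absorb : ∀ (v : List (List Int)) (acc : List (List Int)),
    (∀ x ∈ v, x ∈ acc) →
    v.foldl (fun acc m => if m ∈ acc then acc else acc ++ [m]) acc = acc := by
  intro v
  induction v with
  | nil => intro acc _; rfl
  | cons a t ih =>
      intro acc h
      simp only [List.foldl_cons, if_pos (h a (by simp))]
      exact ih acc (fun x hx => h x (by simp [hx]))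

lemma pv_dedup_append_subset (u v : List (List Int))
    (h : ∀ x ∈ v, x ∈ u) :
    (u ++ v).foldl (fun acc m => if m ∈ acc then acc else acc ++ [m]) [] =
      u.foldl (fun acc m => if m ∈ acc then acc else acc ++ [m]) [] := by
  rw [List.foldl_append]
  exact pv_dedup_absorb v _ (fun x hx => pv_dedup_mem u [] x (Or.inr (h x hx)))

lemma pv_A_parts (pa pb : Int → List Int) (f : List Int) :
    pvABC pa pb (0 :: pvSums 0 f) =
      ((if f = [] then [[pa 0, pb 0]] else [[pa 0, pb 0], [pa f.sum, pb f.sum]]),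
       (pvSums 0 f.dropLast).map (fun y => [pa y, pb y]),
       (if f = [] then [pa 0, pb 0] else [pa 0, pb 0, pa f.sum, pb f.sum])) := by
  cases f with
  | nil => simp [pvABC, pvSums]
  | cons a t =>
      have hne := pv_sums_ne_nil 0 (a :: t) (by simp)
      cases hps : pvSums 0 (a :: t) with
      | nil => exact absurd hps hne
      | cons p q =>
          have hlast : (p :: q).getLast?.getD 0 = (a :: t).sum := by
            rw [← List.getLastD_eq_getLast?, ← hps,
              pv_sums_getLastD (a :: t) (by simp) 0 0, zero_add]
          have hdrop : (p :: q).dropLast = pvSums 0 (a :: t).dropLast := by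
            rw [← hps, ← pv_sums_dropLast]
          simp [pvABC, hlast, hdrop]

lemma pv_dedup_two_block (c1 c2 : List Int) (v : List (List Int))
    (hv : ∀ x ∈ v, x ∈ [c1, c2]) :
    ([c1, c2] ++ v).foldl (fun acc m => if m ∈ acc then acc else acc ++ [m]) [] =
      [c1, c2, c1, c2].foldl (fun acc m => if m ∈ acc then acc else acc ++ [m]) [] := by
  rw [show [c1, c2, c1, c2] = [c1, c2] ++ [c1, c2] from rfl,
    pv_dedup_append_subset [c1, c2] v hv,
    pv_dedup_append_subset [c1, c2] [c1, c2] (by intro x hx; exact hx)]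

-- ===== VERDICT (by name: the statement is the Claim_ definition above) =====
theorem get_edges_lines_corners_main_spec : Claim_equal_get_edges_lines_corners_main := by
  intro f l d3 _
  show get_edges_lines_corners_main f l d3 = get_edges_lines_corners_main_alt f l d3
  have hX : get_edges_lines_corners_single_iteration
      ((0 :: pvSums 0 f).map (fun x => [x, x]))
      ((0 :: pvSums 0 f).map (fun _ => [0, l.sum])) d3 =
      pvABC (fun x => [x, 0] ++ (if d3 then [0] else []))
        (fun x => [x, l.sum] ++ (if d3 then [0] else [])) (0 :: pvSums 0 f) :=
    pv_single_iter _ _ _ _ _ _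
      (fun x => by simp only [pv_pyGetD_pair0, pv_mk_point])
      (fun x => by simp only [pv_pyGetD_pair1, pv_mk_point])
  have hY : get_edges_lines_corners_single_iteration
      ((0 :: pvSums 0 l).map (fun _ => [0, f.sum]))
      ((0 :: pvSums 0 l).map (fun y => [y, y])) d3 =
      pvABC (fun y => [0, y] ++ (if d3 then [0] else []))
        (fun y => [f.sum, y] ++ (if d3 then [0] else [])) (0 :: pvSums 0 l) :=
    pv_single_iter _ _ _ _ _ _
      (fun y => by simp only [pv_pyGetD_pair0, pv_mk_point])
      (fun y => by simp only [pv_pyGetD_pair1, pv_mk_point])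
  unfold get_edges_lines_corners_main get_edges_lines_corners_main_alt
  simp only [pv_corr_lines, hX, hY, pv_A_parts, pv_interiors_eq]
  cases f with
  | nil =>
      cases l with
      | nil =>
          refine Prod.ext rfl (Prod.ext rfl ?_)
          simp only [List.sum_nil, reduceIte]
          rfl
      | cons b u =>
          refine Prod.ext rfl (Prod.ext rfl ?_)
          simp only [List.sum_nil, reduceIte, reduceCtorEq, ite_false]
          exact pv_dedup_two_block _ _ _ (by
            intro x hx
            simp only [List.mem_cons, List.not_mem_nil, or_false] at hx ⊢
            tauto)
  | cons a t =>
      cases l with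
      | nil =>
          refine Prod.ext rfl (Prod.ext rfl ?_)
          simp only [List.sum_nil, reduceIte, reduceCtorEq, ite_false]
          exact pv_dedup_append_subset _ _ (by
            intro x hx
            simp only [List.mem_cons, List.not_mem_nil, or_false] at hx ⊢
            tauto)
      | cons b u =>
          refine Prod.ext rfl (Prod.ext rfl ?_)
          simp only [reduceCtorEq, ite_false]
          exact pv_dedup_append_subset _ _ (by
            intro x hx
            simp only [List.mem_cons, List.not_mem_nil, or_false] at hx ⊢
            tauto)
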